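-- pv_equiv track=rewrite | github.com/ryanliupie/Python-Learning | src/cps_109/labs/midterm_practice/midterm_funcs.py | pyramid_blocks
-- ===== SOURCE A (Python) =====
-- def pyramid_blocks(n, m):
--     '''
--     Assume n and m are integers >= 1.
--     Consider a solid rectangular pyramid, whose base is n-by-m
--     blocks. The layer above is (n-1)-by-(m-1), and so on. The top
--     layer will be n-by-1, or 1-by-m, depending on which dimension
--     reaches 1 first. Assume n and m are integers. Return the number
--     of blocks in the pyramid.
--     '''
--     counter = 0
--
--     while n > 0 and m > 0:
--         x = n * m
--         counter += x
--         n = n - 1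
--         m = m - 1
--
--     return counter
-- ===== SOURCE B (Python) =====
-- def pyramid_blocks(n, m):
--     '''Closed-form count of blocks: sum_{k=0}^{L-1} (n-k)(m-k) with L = min(n, m),
--     evaluated by Faulhaber's formulas in O(1).'''
--     L = min(n, m)
--     if L <= 0:
--         return 0
--     return L * n * m - (n + m) * (L * (L - 1) // 2) + (L - 1) * L * (2 * L - 1) // 6
-- ===== Notes on version B (the rewrite author's own statement) =====
-- stated objective: faster
-- what changed: Replaces the layer-by-layer while loop with a closed-form Faulhaber evaluation of sum_{k=0}^{min(n,m)-1} (n-k)(m-k).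
import Mathlib
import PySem

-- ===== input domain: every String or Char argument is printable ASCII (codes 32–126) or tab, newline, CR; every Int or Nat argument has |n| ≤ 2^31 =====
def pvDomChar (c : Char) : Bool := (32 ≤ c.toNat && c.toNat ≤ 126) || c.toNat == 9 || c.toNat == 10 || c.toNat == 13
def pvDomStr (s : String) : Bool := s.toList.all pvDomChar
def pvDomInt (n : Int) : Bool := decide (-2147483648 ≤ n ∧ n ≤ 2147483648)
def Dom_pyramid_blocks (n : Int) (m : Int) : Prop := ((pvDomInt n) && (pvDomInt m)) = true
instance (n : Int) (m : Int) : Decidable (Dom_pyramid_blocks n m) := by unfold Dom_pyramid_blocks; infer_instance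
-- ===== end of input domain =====

-- B replaces A's layer-by-layer while loop with a closed-form Faulhaber sum (O(1) vs O(min(n,m))).


-- ===== PORT A =====
-- literal port of A's while loop: state (n, m, counter), loop while n > 0 and m > 0
def pyramid_blocks_loop (n : Int) (m : Int) (counter : Int) : Int :=
  if _h : n > 0 ∧ m > 0 then
    pyramid_blocks_loop (n - 1) (m - 1) (counter + n * m)
  else
    counter
termination_by n.toNat
decreasing_by omega

def pyramid_blocks (n : Int) (m : Int) : Int :=
  pyramid_blocks_loop n m 0

-- ===== PORT B =====
def pyramid_blocks_alt (n : Int) (m : Int) : Int :=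
  let L := min n m
  if L ≤ 0 then 0
  else L * n * m - (n + m) * (PySem.Int.floordiv (L * (L - 1)) 2)
        + PySem.Int.floordiv ((L - 1) * L * (2 * L - 1)) 6

-- ===== PRECONDITION & SPEC =====
def Spec_pyramid_blocks (n : Int) (m : Int) (out : Int) : Prop := out = pyramid_blocks_alt n m
instance (n : Int) (m : Int) (out : Int) : Decidable (Spec_pyramid_blocks n m out) := by unfold Spec_pyramid_blocks; infer_instance

-- ===== CLAIM (what is proved, stated in full; the proofs are below) =====
def Claim_equal_pyramid_blocks : Prop := ∀ (n : Int) (m : Int), Dom_pyramid_blocks n m → Spec_pyramid_blocks n m (pyramid_blocks n m)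

-- ===== LEMMAS AND PROOFS =====

-- exact division facts for the two floordivs in B
theorem two_dvd_mul_pred (L : Int) : (2 : Int) ∣ L * (L - 1) := by
  rcases Int.even_or_odd L with ⟨k, hk⟩ | ⟨k, hk⟩
  · exact ⟨k * (L - 1), by rw [hk]; ring⟩
  · exact ⟨L * k, by rw [hk]; ring⟩

theorem six_dvd_sq_sum (L : Int) : (6 : Int) ∣ (L - 1) * L * (2 * L - 1) := by
  have h : L % 6 = 0 ∨ L % 6 = 1 ∨ L % 6 = 2 ∨ L % 6 = 3 ∨ L % 6 = 4 ∨ L % 6 = 5 := by omega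
  obtain ⟨q, hq⟩ : ∃ q, L = 6 * q + L % 6 := ⟨L / 6, by omega⟩
  rcases h with h | h | h | h | h | h <;> rw [hq, h]
  · exact ⟨(6 * q - 1) * q * (12 * q - 1), by ring⟩
  · exact ⟨q * (6 * q + 1) * (12 * q + 1), by ring⟩
  · exact ⟨(6 * q + 1) * (3 * q + 1) * (4 * q + 1), by ring⟩
  · exact ⟨(3 * q + 1) * (2 * q + 1) * (12 * q + 5), by ring⟩
  · exact ⟨(2 * q + 1) * (3 * q + 2) * (12 * q + 7), by ring⟩
  · exact ⟨(3 * q + 2) * (6 * q + 5) * (4 * q + 3), by ring⟩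

theorem floordiv_exact (a b : Int) (h : b ∣ a) :
    PySem.Int.floordiv a b * b = a := by
  have h1 := PySem.Int.floordiv_mul_add_mod a b
  have h2 : PySem.Int.mod a b = 0 := (PySem.Int.mod_eq_zero_iff_dvd a b).2 h
  omega

-- 6 times B's closed form, with both floordivs resolved
theorem six_mul_alt (n m : Int) (hn : 0 < n) (hm : 0 < m) :
    6 * pyramid_blocks_alt n m =
      6 * (min n m) * n * m - 3 * (n + m) * ((min n m) * ((min n m) - 1))
        + ((min n m) - 1) * (min n m) * (2 * (min n m) - 1) := by
  have hL : ¬ (min n m ≤ 0) := by omega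
  have h2 := floordiv_exact ((min n m) * ((min n m) - 1)) 2
    (two_dvd_mul_pred (min n m))
  have h6 := floordiv_exact (((min n m) - 1) * (min n m) * (2 * (min n m) - 1)) 6
    (six_dvd_sq_sum (min n m))
  simp only [pyramid_blocks_alt, hL, if_false]
  linear_combination (-3 : Int) * (n + m) * h2 + h6

theorem alt_nonpos (n m : Int) (h : min n m ≤ 0) : pyramid_blocks_alt n m = 0 := by
  simp [pyramid_blocks_alt, h]

-- the loop step of B's closed form
theorem alt_step (n m : Int) (hn : 0 < n) (hm : 0 < m) :
    pyramid_blocks_alt n m = n * m + pyramid_blocks_alt (n - 1) (m - 1) := by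
  by_cases h1 : min (n - 1) (m - 1) ≤ 0
  · have hL : min n m = 1 := by omega
    rw [alt_nonpos _ _ h1]
    have := six_mul_alt n m hn hm
    rw [hL] at this
    nlinarith [this]
  · have hn1 : 0 < n - 1 := by omega
    have hm1 : 0 < m - 1 := by omega
    have hA := six_mul_alt n m hn hm
    have hB := six_mul_alt (n - 1) (m - 1) hn1 hm1
    have hmin : min (n - 1) (m - 1) = min n m - 1 := by omega
    rw [hmin] at hB
    nlinarith [hA, hB]

-- loop invariant: the loop computes counter + closed form
theorem loop_eq (n m counter : Int) :
    pyramid_blocks_loop n m counter = counter + pyramid_blocks_alt n m := by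
  by_cases h : n > 0 ∧ m > 0
  · rw [pyramid_blocks_loop, dif_pos h, loop_eq (n - 1) (m - 1) (counter + n * m),
      alt_step n m h.1 h.2]
    ring
  · rw [pyramid_blocks_loop, dif_neg h, alt_nonpos n m (by omega)]
    ring
termination_by n.toNat
decreasing_by omega

-- ===== VERDICT (by name: the statement is the Claim_ definition above) =====
theorem pyramid_blocks_spec : Claim_equal_pyramid_blocks := by
  intro n m _
  unfold Spec_pyramid_blocks pyramid_blocks
  rw [loop_eq]
  ring
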